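-- pv_equiv track=rewrite | github.com/wjdals3406/algorithm | baekjoon/그리디/2138_전구와스위치.py | check
-- ===== SOURCE A (Python) =====
-- def change(data, i):
--     if data[i] == '1':
--         data[i] = '0'
--     else: data[i] = '1'
--
-- def check(data, result):
--     cnt = 0
--     for i in range(1, len(data)):
--         if result[i-1] != data[i-1]:
--             change(data, i-1)
--             change(data, i)
--             if i < len(data)-1:
--                 change(data, i+1)
--
--             cnt += 1
--
--     if data != result: return int(1e9)
--     else: return cnt
-- ===== SOURCE B (Python) =====
-- def check(data, result):
--     # Non-mutating rewrite: tracks press parity instead of toggling data in place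
--     # (original A mutates data; equivalence is about the return value only).
--     n = len(data)
--     cnt = 0
--     presses = [0] * n
--     prev2 = prev1 = 0
--     for i in range(1, n):
--         k = prev2 + prev1
--         if k == 0:
--             eff = data[i - 1]
--         else:
--             eff = '1' if (data[i - 1] == '1') == (k % 2 == 0) else '0'
--         press = 1 if result[i - 1] != eff else 0
--         presses[i] = press
--         cnt += press
--         prev2, prev1 = prev1, press
--     final = []
--     for j in range(n):
--         k = presses[j]
--         if j - 1 >= 1:
--             k += presses[j - 1]
--         if j + 1 <= n - 1:
--             k += presses[j + 1]
--         if k == 0: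
--             final.append(data[j])
--         else:
--             final.append('1' if (data[j] == '1') == (k % 2 == 0) else '0')
--     return cnt if final == result else int(1e9)
-- ===== Notes on version B (the rewrite author's own statement) =====
-- stated objective: alternative
-- what changed: B never toggles the array during the greedy scan: it keeps a running press-parity pair (presses at switches i-2 and i-1) to compute each bulb's effective value, records presses in a separate array, and reconstructs the final configuration once at the end from press parities instead of A's repeated in-place change() calls; B also does not mutate data (return value equivalence only).
import Mathlib
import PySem

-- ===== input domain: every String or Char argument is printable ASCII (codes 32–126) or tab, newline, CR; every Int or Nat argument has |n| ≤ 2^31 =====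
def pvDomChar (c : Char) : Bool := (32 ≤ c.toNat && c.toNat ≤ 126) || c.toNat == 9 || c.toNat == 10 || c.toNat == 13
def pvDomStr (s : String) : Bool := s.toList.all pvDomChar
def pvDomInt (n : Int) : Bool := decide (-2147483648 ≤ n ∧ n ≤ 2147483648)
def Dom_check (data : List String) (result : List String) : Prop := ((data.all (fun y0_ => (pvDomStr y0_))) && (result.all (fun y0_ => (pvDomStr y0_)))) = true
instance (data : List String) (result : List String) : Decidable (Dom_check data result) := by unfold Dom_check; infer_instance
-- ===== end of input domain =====

-- B replaces A's repeated in-place toggling by a press-parity scan plus one final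
-- reconstruction (alternative decomposition); A mutates `data` in place, B does not —
-- the equivalence proved here is about the RETURN value only.

-- ===== PORT A =====
def pyToggle (s : String) : String := if s = "1" then "0" else "1"

def change (d : List String) (i : Nat) : List String :=
  d.set i (pyToggle (d.getD i ""))

def checkStep (n : Nat) (result : List String) (st : List String × Int) (i : Nat) :
    List String × Int :=
  if result.getD (i - 1) "" ≠ st.1.getD (i - 1) "" then
    let d1 := change st.1 (i - 1)
    let d2 := change d1 i
    let d3 := if i < n - 1 then change d2 (i + 1) else d2
    (d3, st.2 + 1)
  else st

def check (data : List String) (result : List String) : Int :=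
  let n := data.length
  let st := (List.range' 1 (n - 1)).foldl (checkStep n result) (data, 0)
  if st.1 ≠ result then 1000000000 else st.2

-- ===== PORT B =====
def togVal (s : String) (k : Nat) : String :=
  if k = 0 then s
  else if (s = "1") = (k % 2 = 0) then "1" else "0"

def altStep (data result : List String) (st : List Nat × Int × Nat × Nat) (i : Nat) :
    List Nat × Int × Nat × Nat :=
  let k := st.2.2.1 + st.2.2.2
  let eff := togVal (data.getD (i - 1) "") k
  let press : Nat := if result.getD (i - 1) "" ≠ eff then 1 else 0
  (st.1.set i press, st.2.1 + (press : Int), st.2.2.2, press)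

def altFinal (data : List String) (P : List Nat) (n j : Nat) : String :=
  let k := P.getD j 0 + (if 1 ≤ j - 1 then P.getD (j - 1) 0 else 0) +
           (if j + 1 ≤ n - 1 then P.getD (j + 1) 0 else 0)
  togVal (data.getD j "") k

def check_alt (data : List String) (result : List String) : Int :=
  let n := data.length
  let st := (List.range' 1 (n - 1)).foldl (altStep data result)
              (List.replicate n 0, 0, 0, 0)
  let final := (List.range n).map (fun j => altFinal data st.1 n j)
  if final = result then st.2.1 else 1000000000

-- ===== PRECONDITION & SPEC =====
-- Pre_ excludes exactly the inputs where the Python A raises IndexError: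
-- result shorter than len(data) - 1 (the loop reads result[i-1] up to i = len(data)-1).
def Pre_check (data : List String) (result : List String) : Prop :=
  data.length ≤ result.length + 1
instance (data : List String) (result : List String) : Decidable (Pre_check data result) := by
  unfold Pre_check; infer_instance

def pvWitness_check : List String × List String := (["0", "1", "0"], ["1", "0", "0"])

def Spec_check (data : List String) (result : List String) (out : Int) : Prop :=
  out = check_alt data result
instance (data : List String) (result : List String) (out : Int) :
    Decidable (Spec_check data result out) := by unfold Spec_check; infer_instance

-- ===== CLAIM (what is proved, stated in full; the proofs are below) =====
def Claim_equal_check : Prop := ∀ (data : List String) (result : List String),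
  Dom_check data result → Pre_check data result → Spec_check data result (check data result)

-- ===== LEMMAS AND PROOFS =====

theorem togVal_succ (s : String) (k : Nat) : togVal s (k + 1) = pyToggle (togVal s k) := by
  unfold togVal pyToggle
  rcases Nat.eq_zero_or_pos k with h0 | h0
  · subst h0; by_cases hs : s = "1" <;> simp [hs]
  · have h2 : ¬ (k = 0) := by omega
    rcases Nat.mod_two_eq_zero_or_one k with hp | hp
    · have hq : (k + 1) % 2 = 1 := by omega
      by_cases hs : s = "1" <;> simp [h2, hs, hp, hq]
    · have hq : (k + 1) % 2 = 0 := by omega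
      by_cases hs : s = "1" <;> simp [h2, hs, hp, hq]

theorem togVal_zero (s : String) : togVal s 0 = s := rfl

-- the invariant relating A's mutated array to B's press record after m loop steps
def ChkInv (data : List String) (m : Nat) (a : List String × Int)
    (b : List Nat × Int × Nat × Nat) : Prop :=
  a.2 = b.2.1 ∧
  a.1.length = data.length ∧
  b.1.length = data.length ∧
  b.2.2.1 = b.1.getD (m - 1) 0 ∧
  b.2.2.2 = b.1.getD m 0 ∧
  b.1.getD 0 0 = 0 ∧
  (∀ j, m < j → b.1.getD j 0 = 0) ∧
  (∀ j, j < data.length →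
    a.1.getD j "" =
      togVal (data.getD j "")
        (b.1.getD (j - 1) 0 + b.1.getD j 0 + b.1.getD (j + 1) 0))

theorem getD_set' (l : List Nat) (i j v : Nat) :
    (l.set i v).getD j 0 = if i = j ∧ i < l.length then v else l.getD j 0 := by
  simp only [List.getD, List.getElem?_set]
  by_cases h1 : i = j
  · subst h1
    by_cases h2 : i < l.length
    · simp [h2]
    · simp [h2]
  · simp [h1]

theorem getD_out (l : List Nat) (j : Nat) (h : l.length ≤ j) : l.getD j 0 = 0 := by
  simp [List.getD, List.getElem?_eq_none h]

theorem change_getD_self (d : List String) (i : Nat) (h : i < d.length) :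
    (change d i).getD i "" = pyToggle (d.getD i "") := by
  simp [change, List.getD, h]

theorem change_getD_ne (d : List String) (i j : Nat) (h : i ≠ j) :
    (change d i).getD j "" = d.getD j "" := by
  simp [change, List.getD, List.getElem?_set_ne h]

theorem change_length (d : List String) (i : Nat) :
    (change d i).length = d.length := by simp [change]

theorem inv_holds (data result : List String) (m : Nat) (hm : m ≤ data.length - 1) :
    ChkInv data m
      ((List.range' 1 m).foldl (checkStep data.length result) (data, 0))
      ((List.range' 1 m).foldl (altStep data result) (List.replicate data.length 0, 0, 0, 0)) := by
  induction m with
  | zero =>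
    refine ⟨rfl, rfl, by simp, ?_, ?_, ?_, ?_, ?_⟩ <;>
      simp [togVal_zero]
  | succ m ih =>
    have hm' : m ≤ data.length - 1 := by omega
    have hn : m + 1 < data.length := by omega
    obtain ⟨h1, h2, h3, h4, h5, h6, h7, h8⟩ := ih hm'
    set a := (List.range' 1 m).foldl (checkStep data.length result) (data, 0) with ha
    set b := (List.range' 1 m).foldl (altStep data result) (List.replicate data.length 0, 0, 0, 0) with hb
    rw [List.range'_1_concat]
    simp only [List.foldl_append, List.foldl_cons, List.foldl_nil, ← ha, ← hb,
      Nat.add_comm 1 m]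
    have hi1 : (m + 1) - 1 = m := by omega
    -- the two loop conditions agree
    have heff : a.1.getD m "" = togVal (data.getD m "") (b.2.2.1 + b.2.2.2) := by
      rw [h8 m (by omega), h7 (m + 1) (by omega), Nat.add_zero, h4, h5]
    by_cases hc : result.getD m "" ≠ togVal (data.getD m "") (b.2.2.1 + b.2.2.2)
    · -- press: A toggles two or three cells, B records press = 1
      have hcA : result.getD m "" ≠ a.1.getD m "" := by rw [heff]; exact hc
      simp only [checkStep, altStep, hi1, if_pos hcA, if_pos hc]
      have hPset := fun j => getD_set' b.1 (m + 1) j 1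
      have hlen : m + 1 < b.1.length := by rw [h3]; exact hn
      have hd3len : (if m + 1 < data.length - 1 then
            change (change (change a.1 m) (m + 1)) (m + 1 + 1)
          else change (change a.1 m) (m + 1)).length = data.length := by
        split <;> simp [change_length, h2]
      refine ⟨by simp [h1], hd3len, by simp [h3], ?_, ?_, ?_, ?_, ?_⟩
      · rw [hi1, hPset m, if_neg (by omega), h5]
      · rw [hPset (m + 1), if_pos ⟨rfl, hlen⟩]
      · rw [hPset 0, if_neg (by omega), h6]
      · intro j hj; rw [hPset j, if_neg (by omega)]; exact h7 j (by omega)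
      · intro j hj
        by_cases hjm : j = m
        · rw [hjm]
          have hd : (if m + 1 < data.length - 1 then
                change (change (change a.1 m) (m + 1)) (m + 1 + 1)
              else change (change a.1 m) (m + 1)).getD m "" = pyToggle (a.1.getD m "") := by
            split
            · rw [change_getD_ne _ _ _ (by omega), change_getD_ne _ _ _ (by omega),
                change_getD_self _ _ (by omega : m < a.1.length)]
            · rw [change_getD_ne _ _ _ (by omega),
                change_getD_self _ _ (by omega : m < a.1.length)]
          rw [hd, h8 m (by omega), ← togVal_succ]
          congr 1
          rw [hPset (m - 1), if_neg (by omega), hPset m, if_neg (by omega),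
            hPset (m + 1), if_pos ⟨rfl, hlen⟩, h7 (m + 1) (by omega)]
        · by_cases hjm1 : j = m + 1
          · subst hjm1
            have hd : (if m + 1 < data.length - 1 then
                  change (change (change a.1 m) (m + 1)) (m + 1 + 1)
                else change (change a.1 m) (m + 1)).getD (m + 1) "" =
                pyToggle (a.1.getD (m + 1) "") := by
              have hlen1 : m + 1 < (change a.1 m).length := by
                rw [change_length]; omega
              split
              · rw [change_getD_ne _ _ _ (by omega), change_getD_self _ _ hlen1,
                  change_getD_ne _ _ _ (by omega)]
              · rw [change_getD_self _ _ hlen1, change_getD_ne _ _ _ (by omega)]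
            rw [hd, h8 (m + 1) (by omega), ← togVal_succ]
            congr 1
            rw [hi1, hPset m, if_neg (by omega), hPset (m + 1), if_pos ⟨rfl, hlen⟩,
              hPset (m + 2), if_neg (by omega), h7 (m + 1) (by omega),
              h7 (m + 2) (by omega)]
          · by_cases hjm2 : j = m + 2
            · subst hjm2
              have hg : m + 1 < data.length - 1 := by omega
              have hd : (if m + 1 < data.length - 1 then
                    change (change (change a.1 m) (m + 1)) (m + 1 + 1)
                  else change (change a.1 m) (m + 1)).getD (m + 2) "" =
                  pyToggle (a.1.getD (m + 2) "") := by
                have hlen2 : m + 1 + 1 < (change (change a.1 m) (m + 1)).length := by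
                  rw [change_length, change_length]; omega
                rw [if_pos hg]
                rw [show m + 2 = m + 1 + 1 from rfl, change_getD_self _ _ hlen2,
                  change_getD_ne _ _ _ (by omega), change_getD_ne _ _ _ (by omega)]
              rw [hd, h8 (m + 2) (by omega), ← togVal_succ]
              congr 1
              rw [show m + 2 - 1 = m + 1 from rfl, hPset (m + 1), if_pos ⟨rfl, hlen⟩,
                hPset (m + 2), if_neg (by omega), hPset (m + 3), if_neg (by omega),
                h7 (m + 1) (by omega), h7 (m + 2) (by omega), h7 (m + 3) (by omega)]
            · have hd : (if m + 1 < data.length - 1 then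
                    change (change (change a.1 m) (m + 1)) (m + 1 + 1)
                  else change (change a.1 m) (m + 1)).getD j "" = a.1.getD j "" := by
                split
                · rw [change_getD_ne _ _ _ (by omega), change_getD_ne _ _ _ (by omega),
                    change_getD_ne _ _ _ (by omega)]
                · rw [change_getD_ne _ _ _ (by omega), change_getD_ne _ _ _ (by omega)]
              rw [hd, h8 j hj]
              congr 1
              rw [hPset (j - 1), if_neg (by omega), hPset j, if_neg (by omega),
                hPset (j + 1), if_neg (by omega)]
    · -- no press: A leaves the array alone, B records press = 0
      have hcA : ¬ result.getD m "" ≠ a.1.getD m "" := by rw [heff]; exact hc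
      simp only [checkStep, altStep, hi1, if_neg hcA, if_neg hc]
      have hP0 : b.1.getD (m + 1) 0 = 0 := h7 (m + 1) (by omega)
      have hPset : ∀ j, (b.1.set (m + 1) 0).getD j 0 = b.1.getD j 0 := by
        intro j
        rw [getD_set' b.1 (m + 1) j 0]
        split_ifs with h
        · rw [← h.1, hP0]
        · rfl
      refine ⟨by simp [h1], h2, by simp [h3], ?_, ?_, ?_, ?_, ?_⟩
      · rw [hi1, hPset m, h5]
      · rw [hPset (m + 1), hP0]
      · rw [hPset 0]; exact h6
      · intro j hj; rw [hPset j]; exact h7 j (by omega)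
      · intro j hj; rw [hPset (j - 1), hPset j, hPset (j + 1)]; exact h8 j hj

theorem check_spec' (data result : List String) :
    check data result = check_alt data result := by
  simp only [check, check_alt]
  obtain ⟨h1, h2, h3, h4, h5, h6, h7, h8⟩ :=
    inv_holds data result (data.length - 1) (le_refl _)
  set a := (List.range' 1 (data.length - 1)).foldl (checkStep data.length result) (data, 0) with ha
  set b := (List.range' 1 (data.length - 1)).foldl (altStep data result)
    (List.replicate data.length 0, 0, 0, 0) with hb
  have hfin : (List.range data.length).map (fun j => altFinal data b.1 data.length j) = a.1 := by
    apply List.ext_getElem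
    · simp [h2]
    · intro j hj1 hj2
      simp only [List.getElem_map, List.getElem_range]
      have hjn : j < data.length := by simpa using hj1
      rw [← List.getD_eq_getElem a.1 "" hj2, h8 j hjn]
      simp only [altFinal]
      congr 1
      have e1 : (if 1 ≤ j - 1 then b.1.getD (j - 1) 0 else 0) = b.1.getD (j - 1) 0 := by
        split
        · rfl
        · have hz : j - 1 = 0 := by omega
          rw [hz, h6]
      have e2 : (if j + 1 ≤ data.length - 1 then b.1.getD (j + 1) 0 else 0) =
          b.1.getD (j + 1) 0 := by
        split
        · rfl
        · rw [getD_out b.1 (j + 1) (by omega)]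
      rw [e1, e2]
      omega
  rw [hfin, h1]
  by_cases hres : a.1 = result
  · simp [hres]
  · simp [hres]

-- ===== VERDICT (by name: the statement is the Claim_ definition above) =====
theorem check_spec : Claim_equal_check := by
  intro data result _ _
  unfold Spec_check
  exact check_spec' data result
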